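-- pv_equiv track=rewrite | github.com/leeminHong1990/BaiBianShuangKou | scripts/common/utility.py | checkIsSerialTriple
-- ===== SOURCE A (Python) =====
-- def getCard2NumDict(cards):
-- 	card2NumDict = {}
-- 	for t in cards:
-- 		if t not in card2NumDict:
-- 			card2NumDict[t] = 1
-- 		else:
-- 			card2NumDict[t] += 1
-- 	return card2NumDict
--
-- def checkIsSerialTriple(cards):
-- 	card2NumDict = getCard2NumDict(cards)
-- 	# 3 * 3 以上
-- 	if len(card2NumDict) < 3:
-- 		return False
-- 	# 每样3张
-- 	for card in card2NumDict:
-- 		if card2NumDict[card] != 3: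
-- 			return False
-- 	# 是否连续
-- 	serial = card2NumDict.keys()
-- 	serial = sorted(serial)
-- 	for i in range(len(serial) - 1):
-- 		if serial[i] + 1 != serial[i+1]:
-- 			return False
-- 	return True
-- ===== SOURCE B (Python) =====
-- def checkIsSerialTriple(cards):
-- 	keys = set(cards)
-- 	if len(keys) < 3:
-- 		return False
-- 	if any(cards.count(k) != 3 for k in keys):
-- 		return False
-- 	# one consecutive run <=> exactly one key whose successor is absent
-- 	return sum(1 for k in keys if k + 1 not in keys) == 1
-- ===== Notes on version B (the rewrite author's own statement) =====
-- stated objective: simpler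
-- what changed: B replaces the sort-then-adjacent-pair scan with a set-membership test (exactly one key whose successor is absent from the key set) and replaces the count dict with set(cards) plus cards.count.
import Mathlib
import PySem

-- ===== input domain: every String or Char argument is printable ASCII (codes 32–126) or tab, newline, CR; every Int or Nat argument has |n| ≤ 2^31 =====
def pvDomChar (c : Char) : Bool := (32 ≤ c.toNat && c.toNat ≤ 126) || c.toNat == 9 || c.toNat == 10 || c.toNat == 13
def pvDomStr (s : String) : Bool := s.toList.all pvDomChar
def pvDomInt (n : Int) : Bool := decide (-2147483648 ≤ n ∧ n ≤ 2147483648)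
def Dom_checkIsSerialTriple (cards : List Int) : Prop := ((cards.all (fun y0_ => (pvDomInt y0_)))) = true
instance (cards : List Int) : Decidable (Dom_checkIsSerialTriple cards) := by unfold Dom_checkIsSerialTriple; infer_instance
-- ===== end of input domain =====

-- B checks consecutiveness by set membership (exactly one key with no successor in the set)
-- instead of A's sort + adjacent-pair scan; simpler, no sort.

-- ===== PORT A =====
def getCard2NumDict (cards : List Int) : PySem.Dict Int Int :=
  cards.foldl
    (fun d t => if d.contains t = false then d.insert t 1 else d.insert t (d.getD t 0 + 1))
    PySem.Dict.empty

def checkIsSerialTriple (cards : List Int) : Bool :=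
  let d := getCard2NumDict cards
  if d.size < 3 then false
  else if d.keys.any (fun card => d.getD card 0 ≠ 3) then false
  else
    let serial := PySem.List.sorted d.keys (fun x => x) false
    (PySem.List.pyRange 0 (PySem.List.len serial - 1) 1).all
      (fun i => PySem.List.pyGetD serial i 0 + 1 == PySem.List.pyGetD serial (i + 1) 0)

-- ===== PORT B =====
def checkIsSerialTriple_alt (cards : List Int) : Bool :=
  let keys := PySem.Set.ofList cards
  if keys.length < 3 then false
  else if keys.any (fun k => cards.count k ≠ 3) then false
  else keys.countP (fun k => !decide ((k + 1) ∈ keys)) == 1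

-- ===== PRECONDITION & SPEC =====
def Spec_checkIsSerialTriple (cards : List Int) (out : Bool) : Prop := out = checkIsSerialTriple_alt cards
instance (cards : List Int) (out : Bool) : Decidable (Spec_checkIsSerialTriple cards out) := by unfold Spec_checkIsSerialTriple; infer_instance

-- ===== CLAIM (what is proved, stated in full; the proofs are below) =====
def Claim_equal_checkIsSerialTriple : Prop := ∀ (cards : List Int), Dom_checkIsSerialTriple cards → Spec_checkIsSerialTriple cards (checkIsSerialTriple cards)

-- ===== LEMMAS AND PROOFS =====

-- A's counting loop is Counter(cards)
theorem getCard2NumDict_eq_counter (cards : List Int) :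
    getCard2NumDict cards = PySem.Dict.counter cards := by
  have hfun : (fun (d : PySem.Dict Int Int) t =>
      if d.contains t = false then d.insert t 1 else d.insert t (d.getD t 0 + 1))
      = (fun d t => d.insert t (d.getD t 0 + 1)) := by
    funext d t
    by_cases h : d.contains t = false
    · simp [h, PySem.Dict.getD_of_not_contains d 0 h]
    · simp [h]
  unfold getCard2NumDict
  rw [hfun, PySem.Dict.foldl_insert_getD_add_one_eq_counter]

-- a nonempty strictly increasing list has an element whose successor is absent
theorem exists_succ_not_mem (l : List Int) (hp : l.Pairwise (· < ·)) (hne : l ≠ []) :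
    ∃ k ∈ l, (k + 1) ∉ l := by
  induction l with
  | nil => exact absurd rfl hne
  | cons a s ih =>
    rcases s with _ | ⟨b, t⟩
    · refine ⟨a, List.mem_singleton_self a, ?_⟩
      simp only [List.mem_singleton]
      omega
    · obtain ⟨k, hk, hk1⟩ := ih (List.Pairwise.of_cons hp) (by simp)
      have ha : ∀ x ∈ b :: t, a < x := (List.pairwise_cons.1 hp).1
      refine ⟨k, List.mem_cons_of_mem a hk, ?_⟩
      intro hmem
      rcases List.mem_cons.1 hmem with h | h
      · have := ha k hk; omega
      · exact hk1 h

-- for a strictly increasing list: adjacent-successor chain ↔ exactly one key has no successor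
theorem chain_iff_countP_one (l : List Int) (hp : l.Pairwise (· < ·)) (hne : l ≠ []) :
    l.IsChain (fun a b => a + 1 = b) ↔ l.countP (fun k => !decide ((k + 1) ∈ l)) = 1 := by
  induction l with
  | nil => exact absurd rfl hne
  | cons a s ih =>
    rcases s with _ | ⟨b, t⟩
    · constructor
      · intro _
        simp only [List.countP_cons, List.countP_nil, List.mem_singleton]
        have : ¬ (a + 1 = a) := by omega
        simp [this]
      · intro _; exact List.isChain_singleton a
    · have ha : ∀ x ∈ b :: t, a < x := (List.pairwise_cons.1 hp).1
      have hab : a < b := ha b (List.mem_cons_self)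
      have hptail : (b :: t).Pairwise (· < ·) := List.Pairwise.of_cons hp
      have hbt : ∀ x ∈ t, b < x := (List.pairwise_cons.1 hptail).1
      -- tail count localizes: for k in b::t, (k+1 ∈ a::b::t) ↔ (k+1 ∈ b::t)
      have hloc : (b :: t).countP (fun k => !decide ((k + 1) ∈ a :: b :: t))
          = (b :: t).countP (fun k => !decide ((k + 1) ∈ b :: t)) := by
        apply List.countP_congr
        intro k hk
        have hak : a < k := ha k hk
        simp only [List.mem_cons]
        have : ¬ (k + 1 = a) := by omega
        simp [this]
      -- head membership: a+1 ∈ a::b::t ↔ a+1 = b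
      have hhead : ((a + 1) ∈ a :: b :: t) ↔ a + 1 = b := by
        simp only [List.mem_cons]
        constructor
        · rintro (h | h | h)
          · omega
          · exact h
          · have := hbt _ h; omega
        · intro h; exact Or.inr (Or.inl h)
      have hCpos : 0 < (b :: t).countP (fun k => !decide ((k + 1) ∈ b :: t)) := by
        obtain ⟨k, hk, hk1⟩ := exists_succ_not_mem (b :: t) hptail (by simp)
        exact List.countP_pos_iff.2 ⟨k, hk, by simp [hk1]⟩
      rw [List.countP_cons, hloc]
      rw [List.isChain_cons_cons]
      rw [ih hptail (by simp)]
      by_cases hb : a + 1 = b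
      · simp [hb]
      · have hnm : ¬ ((a + 1) ∈ a :: b :: t) := fun h => hb (hhead.1 h)
        simp only [hnm, hb, decide_false, Bool.not_false, if_pos, false_and, false_iff]
        omega

-- A's range loop over the sorted list is the adjacent-successor chain
theorem range_all_eq_chain (l : List Int) :
    ((PySem.List.pyRange 0 (PySem.List.len l - 1) 1).all
      (fun i => PySem.List.pyGetD l i 0 + 1 == PySem.List.pyGetD l (i + 1) 0))
    = decide (l.IsChain (fun a b => a + 1 = b)) := by
  rw [Bool.eq_iff_iff]
  simp only [List.all_eq_true, beq_iff_eq, decide_eq_true_eq]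
  rw [List.isChain_iff_getElem]
  constructor
  · intro h i hi
    have hmem : (i : Int) ∈ PySem.List.pyRange 0 (PySem.List.len l - 1) 1 := by
      rw [PySem.List.mem_pyRange_one]
      simp only [PySem.List.len_eq]
      omega
    have := h _ hmem
    have h1 : PySem.List.pyGetD l (i : Int) 0 = l[((i : Int)).toNat] :=
      PySem.List.pyGetD_eq_getElem l 0 (by omega) (by omega)
    have h2 : PySem.List.pyGetD l ((i : Int) + 1) 0 = l[((i : Int) + 1).toNat] :=
      PySem.List.pyGetD_eq_getElem l 0 (by omega) (by omega)
    rw [h1, h2] at this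
    have c1 : ((i : Int)).toNat = i := by omega
    have c2 : ((i : Int) + 1).toNat = i + 1 := by omega
    simp only [c1, c2] at this
    exact this
  · intro h i hmem
    rw [PySem.List.mem_pyRange_one] at hmem
    simp only [PySem.List.len_eq] at hmem
    obtain ⟨h0, h1⟩ := hmem
    have hlt : i.toNat + 1 < l.length := by omega
    have e1 : PySem.List.pyGetD l i 0 = l[i.toNat] :=
      PySem.List.pyGetD_eq_getElem l 0 h0 (by omega)
    have e2 : PySem.List.pyGetD l (i + 1) 0 = l[(i + 1).toNat] :=
      PySem.List.pyGetD_eq_getElem l 0 (by omega) (by omega)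
    have c2 : (i + 1).toNat = i.toNat + 1 := by omega
    rw [e1, e2]
    simp only [c2]
    exact h i.toNat hlt

-- ===== VERDICT (by name: the statement is the Claim_ definition above) =====
theorem checkIsSerialTriple_spec : Claim_equal_checkIsSerialTriple := by
  intro cards _
  unfold Spec_checkIsSerialTriple checkIsSerialTriple checkIsSerialTriple_alt
  rw [getCard2NumDict_eq_counter]
  set K := PySem.Set.ofList cards with hK
  have hkeys : (PySem.Dict.counter cards).keys = K := PySem.Dict.keys_counter cards
  have hsize : (PySem.Dict.counter cards).size = K.length := by
    have : (PySem.Dict.counter cards).keys.length = K.length := by rw [hkeys]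
    simpa [PySem.Dict.size, PySem.Dict.keys] using this
  simp only [hsize, hkeys]
  by_cases hlen : K.length < 3
  · rw [if_pos hlen, if_pos hlen]
  · rw [if_neg hlen, if_neg hlen]
    have hany : (K.any fun card => decide ((PySem.Dict.counter cards).getD card 0 ≠ 3))
        = (K.any fun k => decide (cards.count k ≠ 3)) := by
      refine List.any_congr rfl (fun k => ?_)
      rw [PySem.Dict.getD_counter]
      simp only [decide_eq_decide]
      omega
    rw [hany]
    by_cases hbad : (K.any fun k => decide (cards.count k ≠ 3)) = true
    · rw [if_pos hbad, if_pos hbad]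
    · rw [if_neg hbad, if_neg hbad]
      -- consecutive check
      set s := PySem.List.sorted K (fun x => x) false with hs
      have hperm : s.Perm K := PySem.List.sorted_perm K (fun x => x) false
      have hpair : s.Pairwise (· < ·) := PySem.List.sorted_ofList_pairwise_lt cards
      have hne : s ≠ [] := by
        intro h
        rw [PySem.List.sorted_eq_nil_iff] at h
        rw [h] at hlen; simp at hlen
      rw [range_all_eq_chain]
      have hcnt : K.countP (fun k => !decide ((k + 1) ∈ K))
          = s.countP (fun k => !decide ((k + 1) ∈ K)) :=
        (hperm.countP_eq _).symm
      have hcnt2 : s.countP (fun k => !decide ((k + 1) ∈ K))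
          = s.countP (fun k => !decide ((k + 1) ∈ s)) := by
        apply List.countP_congr
        intro k _
        have hm : (k + 1) ∈ s ↔ (k + 1) ∈ K := hperm.mem_iff
        simp [hm]
      rw [Bool.eq_iff_iff]
      simp only [decide_eq_true_eq, beq_iff_eq]
      rw [chain_iff_countP_one s hpair hne, hcnt, hcnt2]
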